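-- pv_equiv track=rewrite | github.com/Vanlightly/simulation | queues/python-sim/queues.py | ideal_number
-- ===== SOURCE A (Python) =====
-- def is_active(queue, app, queues_cons):
--     if len(queues_cons[queue]) > 0:
--         return queues_cons[queue][0] == app
--
--     return False
--
-- def active_count(app, queues_cons):
--     count = 0
--
--     for queue in queues_cons:
--         if is_active(queue, app, queues_cons):
--             count += 1
--
--     return count
--
-- def ideal_number(app, apps, queues_cons):
--     # The ideal number takes into account the number of active
--     # queues already. This is what the 'position' is used for.
--     if len(apps) == 0:
--         return 0
--
--     ideal = len(queues_cons) // len(apps)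
--     remainder = len(queues_cons) % len(apps)
--     position = 0
--     app_active = active_count(app, queues_cons)
--     for clnt in apps:
--         active = active_count(clnt, queues_cons)
--         if active > app_active:
--             position += 1
--         elif active == app_active and app < clnt:
--             position += 1
--
--     if remainder >= position + 1:
--         return ideal + 1
--     else:
--         return ideal
-- ===== SOURCE B (Python) =====
-- def ideal_number(app, apps, queues_cons):
--     # Build the active counts in ONE pass over the queues (head -> number of
--     # queues it is active on), instead of rescanning all queues per app.
--     if not apps:
--         return 0
--     counts = {}
--     for vs in queues_cons.values():
--         if vs:
--             counts[vs[0]] = counts.get(vs[0], 0) + 1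
--     mine = (counts.get(app, 0), app)
--     position = sum(1 for c in apps if (counts.get(c, 0), c) > mine)
--     q, r = divmod(len(queues_cons), len(apps))
--     return q + 1 if r > position else q
-- ===== Notes on version B (the rewrite author's own statement) =====
-- stated objective: faster
-- what changed: B builds a head->count dictionary in one pass over the queues and ranks each app by a single (count, name) tuple comparison, instead of A's rescanning all queues once per app (and once for the target app); the Lean Pre_ only excludes association lists with duplicate queue keys, which cannot arise from a Python dict.
import Mathlib
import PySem

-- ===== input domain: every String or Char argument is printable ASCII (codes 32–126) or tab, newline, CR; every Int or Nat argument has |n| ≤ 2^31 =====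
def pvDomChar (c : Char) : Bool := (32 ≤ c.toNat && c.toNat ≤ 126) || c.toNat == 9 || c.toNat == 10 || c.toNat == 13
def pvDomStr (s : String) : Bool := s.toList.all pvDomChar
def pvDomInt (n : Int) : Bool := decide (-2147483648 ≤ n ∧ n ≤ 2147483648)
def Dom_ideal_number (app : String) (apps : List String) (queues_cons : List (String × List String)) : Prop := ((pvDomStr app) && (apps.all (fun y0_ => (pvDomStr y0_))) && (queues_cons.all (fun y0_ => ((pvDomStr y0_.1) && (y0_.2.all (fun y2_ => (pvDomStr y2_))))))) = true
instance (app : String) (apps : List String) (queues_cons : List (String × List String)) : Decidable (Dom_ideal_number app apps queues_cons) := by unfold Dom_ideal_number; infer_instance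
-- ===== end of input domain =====

-- B replaces A's per-app rescan of all queues by one pass building head->count, then a
-- single tuple-key comparison per app: O(Q·N) -> O(Q+N) (objective: faster).


-- ===== PORT A =====
-- queues_cons[queue]: dict lookup (first match); is_active is only called with a key of the dict
def is_active (queue : String) (app : String) (queues_cons : List (String × List String)) : Bool :=
  let q := PySem.Dict.getD (PySem.Dict.mk queues_cons) queue []
  if 0 < q.length then PySem.List.pyGetD q 0 "" == app else false

-- 'for queue in queues_cons' iterates the dict's keys in insertion order
def active_count (app : String) (queues_cons : List (String × List String)) : Int :=
  queues_cons.foldl (fun count kv => if is_active kv.1 app queues_cons then count + 1 else count) 0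

def ideal_number (app : String) (apps : List String) (queues_cons : List (String × List String)) : Int :=
  if apps.length = 0 then 0
  else
    let ideal := PySem.Int.floordiv (queues_cons.length : Int) (apps.length : Int)
    let remainder := PySem.Int.mod (queues_cons.length : Int) (apps.length : Int)
    let app_active := active_count app queues_cons
    let position := apps.foldl (fun pos clnt =>
      let active := active_count clnt queues_cons
      if active > app_active then pos + 1
      else if active = app_active ∧ app < clnt then pos + 1
      else pos) (0 : Int)
    if remainder ≥ position + 1 then ideal + 1 else ideal

-- ===== PORT B =====
-- Python tuple comparison (count, name) > (count, name)
def pairGt (x y : Int × String) : Bool :=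
  decide (x.1 > y.1) || (x.1 == y.1 && decide (y.2 < x.2))

def ideal_number_alt (app : String) (apps : List String) (queues_cons : List (String × List String)) : Int :=
  if apps.isEmpty then 0
  else
    -- one pass over the queues' value lists: head -> number of queues it is active on
    let counts : PySem.Dict String Int := queues_cons.foldl (fun d kv =>
      match kv.2 with
      | [] => d
      | h :: _ => d.insert h (d.getD h 0 + 1)) PySem.Dict.empty
    let mine : Int × String := (counts.getD app 0, app)
    let position : Int := (apps.countP (fun c => pairGt (counts.getD c 0, c) mine) : Nat)
    let q := PySem.Int.floordiv (queues_cons.length : Int) (apps.length : Int)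
    let r := PySem.Int.mod (queues_cons.length : Int) (apps.length : Int)
    if r > position then q + 1 else q

-- ===== PRECONDITION & SPEC =====
-- Pre_ excludes association lists with duplicate queue keys: such inputs cannot arise from a
-- Python dict, and on them A's repeated first-match lookup and B's per-entry counting are both
-- accidental readings of a value Python cannot even represent.
def Pre_ideal_number (app : String) (apps : List String) (queues_cons : List (String × List String)) : Prop :=
  (queues_cons.map Prod.fst).Nodup
instance (app : String) (apps : List String) (queues_cons : List (String × List String)) : Decidable (Pre_ideal_number app apps queues_cons) := by unfold Pre_ideal_number; infer_instance

def pvWitness_ideal_number : String × List String × (List (String × List String)) :=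
  ("a", ["a", "b"], [("q1", ["a"]), ("q2", ["b"]), ("q3", [])])

def Spec_ideal_number (app : String) (apps : List String) (queues_cons : List (String × List String)) (out : Int) : Prop := out = ideal_number_alt app apps queues_cons
instance (app : String) (apps : List String) (queues_cons : List (String × List String)) (out : Int) : Decidable (Spec_ideal_number app apps queues_cons out) := by unfold Spec_ideal_number; infer_instance

-- ===== CLAIM (what is proved, stated in full; the proofs are below) =====
def Claim_equal_ideal_number : Prop := ∀ (app : String) (apps : List String) (queues_cons : List (String × List String)), Dom_ideal_number app apps queues_cons → Pre_ideal_number app apps queues_cons → Spec_ideal_number app apps queues_cons (ideal_number app apps queues_cons)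

-- ===== LEMMAS AND PROOFS =====

-- Bool test "this queue entry is active for c" read off the entry itself
def headEq (c : String) (kv : String × List String) : Bool := kv.2.head? == some c

theorem mk_get?_of_mem (qc : List (String × List String)) (kv : String × List String)
    (hn : (qc.map Prod.fst).Nodup) (hm : kv ∈ qc) :
    (PySem.Dict.mk qc).get? kv.1 = some kv.2 := by
  induction qc with
  | nil => cases hm
  | cons hd tl ih =>
    rw [show (hd :: tl : List (String × List String)) = (hd.1, hd.2) :: tl by simp,
      PySem.Dict.get?_mk_cons]
    simp only [List.map_cons, List.nodup_cons] at hn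
    rcases List.mem_cons.mp hm with h | h
    · subst h; simp
    · have hne : hd.1 ≠ kv.1 := by
        intro he; exact hn.1 (he ▸ List.mem_map_of_mem h)
      simp [hne, ih hn.2 h]

theorem is_active_eq (qc : List (String × List String)) (c : String) (kv : String × List String)
    (hn : (qc.map Prod.fst).Nodup) (hm : kv ∈ qc) :
    is_active kv.1 c qc = headEq c kv := by
  unfold is_active headEq
  simp only [PySem.Dict.getD, mk_get?_of_mem qc kv hn hm]
  cases kv.2 with
  | nil => simp
  | cons h t => simp [PySem.List.pyGetD, PySem.List.pyGet?, PySem.List.pyIdx?]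

theorem active_count_eq (qc : List (String × List String)) (c : String)
    (hn : (qc.map Prod.fst).Nodup) :
    active_count c qc = (qc.countP (headEq c) : Nat) := by
  unfold active_count
  rw [PySem.List.foldl_count_if (fun kv => is_active kv.1 c qc) qc 0]
  rw [List.countP_congr (fun kv hm => by rw [is_active_eq qc c kv hn hm])]
  simp

theorem counts_loop (qc : List (String × List String)) (d : PySem.Dict String Int) (c : String) :
    (qc.foldl (fun d kv =>
      match kv.2 with
      | [] => d
      | h :: _ => d.insert h (d.getD h 0 + 1)) d).getD c 0
      = d.getD c 0 + (qc.countP (headEq c) : Nat) := by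
  induction qc generalizing d with
  | nil => simp
  | cons hd tl ih =>
    simp only [List.foldl_cons, List.countP_cons]
    cases hv : hd.2 with
    | nil => simp [ih, headEq, hv]
    | cons h t =>
      rw [ih]
      by_cases hc : h = c
      · subst hc
        rw [PySem.Dict.getD_insert_self]
        simp [headEq, hv]
        omega
      · rw [PySem.Dict.getD_insert_of_ne _ _ _ (by exact fun he => hc he.symm)]
        simp [headEq, hv, hc]

theorem if_chain (x y : Int) (s t : String) (pos : Int) :
    (if x > y then pos + 1 else if x = y ∧ s < t then pos + 1 else pos)
    = (if pairGt (x, t) (y, s) then pos + 1 else pos) := by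
  have hc : pairGt (x, t) (y, s) = true ↔ (y < x ∨ (x = y ∧ s < t)) := by
    simp only [pairGt, Bool.or_eq_true, Bool.and_eq_true, decide_eq_true_eq, beq_iff_eq, gt_iff_lt]
  split_ifs with h1 h2 h3 h4 h5 <;> try rfl
  · exact absurd (hc.mpr (Or.inl h1)) h2
  · exact absurd (hc.mpr (Or.inr h3)) h4
  · rcases hc.mp h5 with h | h
    · exact absurd h h1
    · exact absurd h h3

-- ===== VERDICT (by name: the statement is the Claim_ definition above) =====
theorem ideal_number_spec : Claim_equal_ideal_number := by
  intro app apps qc _ hpre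
  unfold Spec_ideal_number ideal_number ideal_number_alt
  by_cases hz : apps.length = 0
  · simp [List.length_eq_zero_iff.mp hz]
  · have hne : apps.isEmpty = false := by
      cases apps with
      | nil => exact absurd rfl hz
      | cons a l => rfl
    simp only [hz, hne, if_false, Bool.false_eq_true]
    have hcnt : ∀ c, active_count c qc = ((qc.countP (headEq c) : Nat) : Int) :=
      fun c => active_count_eq qc c hpre
    have hcounts : ∀ c : String, (List.foldl (fun (d : PySem.Dict String Int) (kv : String × List String) =>
        match kv.2 with
        | [] => d
        | h :: _ => d.insert h (d.getD h 0 + 1)) PySem.Dict.empty qc).getD c 0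
        = ((qc.countP (headEq c) : Nat) : Int) := by
      intro c
      rw [counts_loop]
      simp [PySem.Dict.getD, PySem.Dict.empty, PySem.Dict.get?]
    have hstep : (fun (pos : Int) clnt =>
        let active := active_count clnt qc
        if active > active_count app qc then pos + 1
        else if active = active_count app qc ∧ app < clnt then pos + 1
        else pos)
        = (fun (pos : Int) clnt =>
          if pairGt (((qc.countP (headEq clnt) : Nat) : Int), clnt) (((qc.countP (headEq app) : Nat) : Int), app) then pos + 1 else pos) := by
      funext pos clnt
      simp only [hcnt]
      exact if_chain _ _ _ _ _
    rw [hstep, PySem.List.foldl_count_if]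
    simp only [hcounts]
    split_ifs <;> omega
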